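-- pv_equiv track=rewrite | github.com/alfredgamulo/advent_of_code | 2019/04/main.py | fits2
-- ===== SOURCE A (Python) =====
-- def fits2(number):
--     str_n = str(number)
--     triplets = set()
--     for x, y, z in list(zip(str_n, str_n[1:], str_n[2:])):
--        if x == y == z:
--            triplets.add(x)
--     for x, y in list(zip(str_n, str_n[1:])):
--         if x == y and x not in triplets:
--             return True
--     return False
-- ===== SOURCE B (Python) =====
-- def _runs(s):
--     if not s:
--         return []
--     rest = _runs(s[1:])
--     if rest and rest[0][0] == s[0]:
--         return [(s[0], rest[0][1] + 1)] + rest[1:]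
--     return [(s[0], 1)] + rest
--
--
-- def fits2(number):
--     runs = _runs(str(number))
--     triples = {c for c, k in runs if k >= 3}
--     return any(k >= 2 and c not in triples for c, k in runs)
-- ===== Notes on version B (the rewrite author's own statement) =====
-- stated objective: simpler
-- what changed: B replaces A's two zip-window scans (char triples then char pairs) by a decomposition of str(number) into maximal runs of equal digits, taking the triple-digit set from runs at least three long and answering whether some run at least two long has a digit outside that set.
import Mathlib
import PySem

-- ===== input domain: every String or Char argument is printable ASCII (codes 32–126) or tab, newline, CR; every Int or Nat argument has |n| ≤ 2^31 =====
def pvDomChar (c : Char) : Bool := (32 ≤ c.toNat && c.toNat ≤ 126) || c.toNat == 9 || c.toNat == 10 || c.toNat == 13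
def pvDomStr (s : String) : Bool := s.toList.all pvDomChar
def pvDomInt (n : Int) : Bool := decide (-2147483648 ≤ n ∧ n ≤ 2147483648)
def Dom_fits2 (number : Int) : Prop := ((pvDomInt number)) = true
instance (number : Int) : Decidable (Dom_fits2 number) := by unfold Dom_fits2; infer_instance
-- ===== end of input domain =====

-- B re-implements A via a run-length decomposition of str(number) instead of A's two
-- sliding-window zip scans; same O(n) cost, simpler structure (objective: simpler).

-- ===== PORT A =====
def fits2 (number : Int) : Bool :=
  let s := PySem.Int.toChars number
  let triplets : PySem.Set Char :=
    ((s.zip s.tail).zip s.tail.tail).foldl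
      (fun acc p => if p.1.1 = p.1.2 ∧ p.1.2 = p.2 then PySem.Set.add acc p.1.1 else acc)
      PySem.Set.empty
  (s.zip s.tail).any (fun p => decide (p.1 = p.2) && !decide (p.1 ∈ triplets))

-- ===== PORT B =====
def runsOf : List Char → List (Char × Nat)
  | [] => []
  | a :: l =>
    match runsOf l with
    | [] => [(a, 1)]
    | (c, k) :: r => if a = c then (c, k + 1) :: r else (a, 1) :: (c, k) :: r

def fits2_alt (number : Int) : Bool :=
  let rs := runsOf (PySem.Int.toChars number)
  let triples : PySem.Set Char :=
    PySem.Set.ofList ((rs.filter (fun p => decide (3 ≤ p.2))).map Prod.fst)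
  rs.any (fun p => decide (2 ≤ p.2) && !decide (p.1 ∈ triples))

-- ===== PRECONDITION & SPEC =====
def Spec_fits2 (number : Int) (out : Bool) : Prop := out = fits2_alt number
instance (number : Int) (out : Bool) : Decidable (Spec_fits2 number out) := by unfold Spec_fits2; infer_instance

-- ===== CLAIM (what is proved, stated in full; the proofs are below) =====
def Claim_equal_fits2 : Prop := ∀ (number : Int), Dom_fits2 number → Spec_fits2 number (fits2 number)

-- ===== LEMMAS AND PROOFS =====

-- membership in A's foldl-built triplet set
lemma mem_foldl_triplets (z : List ((Char × Char) × Char)) (acc : PySem.Set Char) (x : Char) :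
    x ∈ z.foldl
      (fun acc p => if p.1.1 = p.1.2 ∧ p.1.2 = p.2 then PySem.Set.add acc p.1.1 else acc) acc
    ↔ x ∈ acc ∨ ((x, x), x) ∈ z := by
  induction z generalizing acc with
  | nil => simp
  | cons p z ih =>
    obtain ⟨⟨a, b⟩, c⟩ := p
    simp only [List.foldl_cons, ih, List.mem_cons, Prod.mk.injEq]
    split_ifs with h
    · obtain ⟨hab, hbc⟩ := h
      subst hab; subst hbc
      rw [PySem.Set.mem_add]
      tauto
    · have hne : ¬ ((x = a ∧ x = b) ∧ x = c) := by
        rintro ⟨⟨h1, h2⟩, h3⟩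
        exact h ⟨h1.symm.trans h2, h2.symm.trans h3⟩
      tauto

lemma runsOf_cons_eq (a : Char) (l : List Char) :
    runsOf (a :: l) = match runsOf l with
      | [] => [(a, 1)]
      | (c, k) :: r => if a = c then (c, k + 1) :: r else (a, 1) :: (c, k) :: r := rfl

lemma runsOf_cons (a : Char) (l : List Char) :
    ∃ k r, runsOf (a :: l) = (a, k) :: r ∧ 1 ≤ k := by
  cases h : runsOf l with
  | nil => exact ⟨1, [], by simp [runsOf, h], le_refl 1⟩
  | cons p r =>
    obtain ⟨c, k⟩ := p
    by_cases hac : a = c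
    · subst hac
      exact ⟨k + 1, r, by simp [runsOf, h], by omega⟩
    · exact ⟨1, (c, k) :: r, by simp [runsOf, h, hac], le_refl 1⟩

-- a pair of equal adjacent chars c ↔ some run of c has length ≥ 2
lemma pair_iff : ∀ (l : List Char) (c : Char),
    (c, c) ∈ l.zip l.tail ↔ ∃ p ∈ runsOf l, p.1 = c ∧ 2 ≤ p.2 := by
  intro l
  induction l with
  | nil => intro c; simp [runsOf]
  | cons a l ih =>
    intro c
    cases l with
    | nil => simp [runsOf]
    | cons b l' =>
      by_cases hab : a = b
      · subst hab
        obtain ⟨k, r, hruns, hk⟩ := runsOf_cons a l'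
        have hstep : runsOf (a :: a :: l') = (a, k + 1) :: r := by
          rw [runsOf_cons_eq, hruns]; simp
        rw [hstep]
        have ih' := ih c
        simp only [List.tail_cons] at ih'
        rw [hruns] at ih'
        simp only [List.tail_cons, List.zip_cons_cons, List.mem_cons, Prod.mk.injEq] at ih' ⊢
        by_cases hc : c = a
        · constructor
          · intro _; exact ⟨(a, k + 1), Or.inl rfl, hc.symm, by omega⟩
          · intro _; exact Or.inl ⟨hc, hc⟩
        · constructor
          · rintro (⟨h1', _⟩ | h)
            · exact absurd h1' hc
            · obtain ⟨p, hp, hp1, hp2⟩ := ih'.mp h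
              rcases hp with rfl | hp
              · exact absurd hp1.symm hc
              · exact ⟨p, Or.inr hp, hp1, hp2⟩
          · rintro ⟨p, hp, hp1, hp2⟩
            rcases hp with rfl | hp
            · exact absurd hp1.symm hc
            · exact Or.inr (ih'.mpr ⟨p, Or.inr hp, hp1, hp2⟩)
      · obtain ⟨k, r, hruns, hk⟩ := runsOf_cons b l'
        have hstep : runsOf (a :: b :: l') = (a, 1) :: (b, k) :: r := by
          rw [runsOf_cons_eq, hruns]; simp [hab]
        rw [hstep, ← hruns]
        have ih' := ih c
        simp only [List.tail_cons] at ih'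
        simp only [List.tail_cons, List.zip_cons_cons, List.mem_cons, Prod.mk.injEq] at ih' ⊢
        constructor
        · rintro (⟨h1', h2'⟩ | h)
          · exact absurd (h1'.symm.trans h2') hab
          · obtain ⟨p, hp, hp1, hp2⟩ := ih'.mp h
            exact ⟨p, Or.inr hp, hp1, hp2⟩
        · rintro ⟨p, hp, hp1, hp2⟩
          rcases hp with rfl | hp
          · simp at hp2
          · exact Or.inr (ih'.mpr ⟨p, hp, hp1, hp2⟩)

-- a triple of equal adjacent chars c ↔ some run of c has length ≥ 3
lemma triple_iff : ∀ (l : List Char) (c : Char),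
    ((c, c), c) ∈ (l.zip l.tail).zip l.tail.tail ↔ ∃ p ∈ runsOf l, p.1 = c ∧ 3 ≤ p.2 := by
  intro l
  induction l with
  | nil => intro c; simp [runsOf]
  | cons a l ih =>
    intro c
    cases l with
    | nil => simp [runsOf]
    | cons b l' =>
      cases l' with
      | nil =>
        have h1 : runsOf [b] = [(b, 1)] := rfl
        by_cases hab : a = b
        · subst hab
          have h2 : runsOf [a, a] = [(a, 2)] := by rw [runsOf_cons_eq, h1]; simp
          simp [h2]
        · have h2 : runsOf [a, b] = [(a, 1), (b, 1)] := by rw [runsOf_cons_eq, h1]; simp [hab]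
          simp [h2]
      | cons e l'' =>
        by_cases hab : a = b
        · subst hab
          by_cases hbe : a = e
          · subst hbe
            obtain ⟨k, r, hruns, hk⟩ := runsOf_cons a l''
            have h1 : runsOf (a :: a :: l'') = (a, k + 1) :: r := by
              rw [runsOf_cons_eq, hruns]; simp
            have h2 : runsOf (a :: a :: a :: l'') = (a, k + 2) :: r := by
              rw [runsOf_cons_eq, h1]; simp
            rw [h2]
            have ih' := ih c
            simp only [List.tail_cons] at ih'
            rw [h1] at ih'
            simp only [List.tail_cons, List.zip_cons_cons, List.mem_cons, Prod.mk.injEq] at ih' ⊢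
            by_cases hc : c = a
            · constructor
              · intro _; exact ⟨(a, k + 2), Or.inl rfl, hc.symm, by omega⟩
              · intro _; exact Or.inl ⟨⟨hc, hc⟩, hc⟩
            · constructor
              · rintro (⟨⟨h1', _⟩, _⟩ | h)
                · exact absurd h1' hc
                · obtain ⟨p, hp, hp1, hp2⟩ := ih'.mp h
                  rcases hp with rfl | hp
                  · exact absurd hp1.symm hc
                  · exact ⟨p, Or.inr hp, hp1, hp2⟩
              · rintro ⟨p, hp, hp1, hp2⟩
                rcases hp with rfl | hp
                · exact absurd hp1.symm hc
                · exact Or.inr (ih'.mpr ⟨p, Or.inr hp, hp1, hp2⟩)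
          · obtain ⟨m, r, hruns, hm⟩ := runsOf_cons e l''
            have h1 : runsOf (a :: e :: l'') = (a, 1) :: (e, m) :: r := by
              rw [runsOf_cons_eq, hruns]; simp [hbe]
            have h2 : runsOf (a :: a :: e :: l'') = (a, 2) :: (e, m) :: r := by
              rw [runsOf_cons_eq, h1]; simp
            rw [h2]
            have ih' := ih c
            simp only [List.tail_cons] at ih'
            rw [h1] at ih'
            simp only [List.tail_cons, List.zip_cons_cons, List.mem_cons, Prod.mk.injEq] at ih' ⊢
            constructor
            · rintro (⟨⟨_, h2'⟩, h3'⟩ | h)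
              · exact absurd (h2'.symm.trans h3') hbe
              · obtain ⟨p, hp, hp1, hp2⟩ := ih'.mp h
                rcases hp with rfl | hp
                · simp at hp2
                · exact ⟨p, Or.inr hp, hp1, hp2⟩
            · rintro ⟨p, hp, hp1, hp2⟩
              rcases hp with rfl | hp
              · simp at hp2
              · exact Or.inr (ih'.mpr ⟨p, Or.inr hp, hp1, hp2⟩)
        · obtain ⟨m, r, hruns, hm⟩ := runsOf_cons b (e :: l'')
          have h2 : runsOf (a :: b :: e :: l'') = (a, 1) :: (b, m) :: r := by
            rw [runsOf_cons_eq, hruns]; simp [hab]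
          rw [h2, ← hruns]
          have ih' := ih c
          simp only [List.tail_cons] at ih'
          simp only [List.tail_cons, List.zip_cons_cons, List.mem_cons, Prod.mk.injEq] at ih' ⊢
          constructor
          · rintro (⟨⟨h1', h2'⟩, _⟩ | h)
            · exact absurd (h1'.symm.trans h2') hab
            · obtain ⟨p, hp, hp1, hp2⟩ := ih'.mp h
              exact ⟨p, Or.inr hp, hp1, hp2⟩
          · rintro ⟨p, hp, hp1, hp2⟩
            rcases hp with rfl | hp
            · simp at hp2
            · exact Or.inr (ih'.mpr ⟨p, hp, hp1, hp2⟩)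

-- membership in B's triple-digit set
lemma mem_triples (rs : List (Char × Nat)) (x : Char) :
    x ∈ PySem.Set.ofList ((rs.filter (fun p => decide (3 ≤ p.2))).map Prod.fst)
    ↔ ∃ q ∈ rs, q.1 = x ∧ 3 ≤ q.2 := by
  rw [PySem.Set.mem_ofList]
  simp only [List.mem_map, List.mem_filter, decide_eq_true_eq]
  constructor
  · rintro ⟨q, ⟨hq, hq3⟩, hq1⟩
    exact ⟨q, hq, hq1, hq3⟩
  · rintro ⟨q, hq, hq1, hq3⟩
    exact ⟨q, ⟨hq, hq3⟩, hq1⟩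

-- the core equality on an arbitrary character list
lemma core_eq (l : List Char) :
    ((l.zip l.tail).any (fun p => decide (p.1 = p.2) &&
        !decide (p.1 ∈ ((l.zip l.tail).zip l.tail.tail).foldl
          (fun acc p => if p.1.1 = p.1.2 ∧ p.1.2 = p.2 then PySem.Set.add acc p.1.1 else acc)
          PySem.Set.empty)))
    = (runsOf l).any (fun p => decide (2 ≤ p.2) &&
        !decide (p.1 ∈ PySem.Set.ofList
          (((runsOf l).filter (fun p => decide (3 ≤ p.2))).map Prod.fst))) := by
  rw [Bool.eq_iff_iff]
  simp only [List.any_eq_true, Bool.and_eq_true, Bool.not_eq_true', decide_eq_true_eq,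
    decide_eq_false_iff_not]
  constructor
  · rintro ⟨⟨x, y⟩, hmem, hxy, hnot⟩
    cases hxy
    rw [mem_foldl_triplets] at hnot
    have hnt : ((x, x), x) ∉ (l.zip l.tail).zip l.tail.tail := fun h => hnot (Or.inr h)
    rw [triple_iff] at hnt
    obtain ⟨p, hp, hp1, hp2⟩ := (pair_iff l x).mp hmem
    refine ⟨p, hp, hp2, ?_⟩
    rw [mem_triples, hp1]
    exact hnt
  · rintro ⟨p, hp, hp2, hnot⟩
    rw [mem_triples] at hnot
    have hpair : (p.1, p.1) ∈ l.zip l.tail := (pair_iff l p.1).mpr ⟨p, hp, rfl, hp2⟩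
    refine ⟨(p.1, p.1), hpair, rfl, ?_⟩
    rw [mem_foldl_triplets]
    rintro (h | h)
    · simp [PySem.Set.empty] at h
    · exact hnot ((triple_iff l p.1).mp h)

-- ===== VERDICT (by name: the statement is the Claim_ definition above) =====
theorem fits2_spec : Claim_equal_fits2 := by
  intro number _
  show fits2 number = fits2_alt number
  unfold fits2 fits2_alt
  exact core_eq (PySem.Int.toChars number)
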